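-- pv_equiv track=rewrite | github.com/sghariha/Airbnb_Recommendations | generate_session_distinct_counts_and_time_features.py | add_all_and_distinct_counts_to_user_feature_vector
-- ===== SOURCE A (Python) =====
-- def add_all_and_distinct_counts_to_user_feature_vector(
--         sessions_by_user, session_features, session_features_by_user):
--
--     for user in session_features_by_user:
--         user_n_actions = 0
--         user_distinct_actions = set()
--         user_distinct_action_types = set()
--         user_distinct_action_detail = set()
--         user_distinct_device_types = set()
--
--         for entry in sessions_by_user[user]:
--             user_distinct_actions.add(entry[session_features['action']])
--             user_distinct_action_types.add(entry[session_features['action_type']])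
--             user_distinct_action_detail.add(entry[session_features['action_detail']])
--             user_distinct_device_types.add(entry[session_features['device_type']])
--             user_n_actions += 1
--
--         session_features_by_user[user]['n_actions_per_user'] = user_n_actions
--         session_features_by_user[user]['n_distinct_actions'] = len(user_distinct_actions)
--         session_features_by_user[user]['n_distinct_action_types'] = len(user_distinct_action_types)
--         session_features_by_user[user]['n_distinct_action_detail'] = len(user_distinct_action_detail)
--         session_features_by_user[user]['n_distinct_device_types'] = len(user_distinct_device_types)
--
--     return session_features_by_user
-- ===== SOURCE B (Python) =====
-- def _n_distinct_sorted(vals):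
--     # sort-then-scan distinct count: equal values become adjacent, so counting
--     # positions where the value changes (or the first one) counts distinct values
--     n = 0
--     prev = None
--     for v in sorted(vals):
--         if prev is None or v != prev:
--             n += 1
--         prev = v
--     return n
--
--
-- def add_all_and_distinct_counts_to_user_feature_vector(
--         sessions_by_user, session_features, session_features_by_user):
--     for user in session_features_by_user:
--         entries = sessions_by_user[user]
--         fv = session_features_by_user[user]
--         fv['n_actions_per_user'] = len(entries)
--         fv['n_distinct_actions'] = _n_distinct_sorted(
--             [e[session_features['action']] for e in entries])
--         fv['n_distinct_action_types'] = _n_distinct_sorted(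
--             [e[session_features['action_type']] for e in entries])
--         fv['n_distinct_action_detail'] = _n_distinct_sorted(
--             [e[session_features['action_detail']] for e in entries])
--         fv['n_distinct_device_types'] = _n_distinct_sorted(
--             [e[session_features['device_type']] for e in entries])
--     return session_features_by_user
-- ===== Notes on version B (the rewrite author's own statement) =====
-- stated objective: alternative
-- what changed: B computes each distinct count by a different algorithm: instead of A's fused per-entry pass maintaining four hash-set accumulators and a counter, B takes len(entries) and, per feature, sorts the extracted value list and counts positions where the value changes (sort-then-scan distinct counting, correct because sorting makes equal values adjacent).
import Mathlib
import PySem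

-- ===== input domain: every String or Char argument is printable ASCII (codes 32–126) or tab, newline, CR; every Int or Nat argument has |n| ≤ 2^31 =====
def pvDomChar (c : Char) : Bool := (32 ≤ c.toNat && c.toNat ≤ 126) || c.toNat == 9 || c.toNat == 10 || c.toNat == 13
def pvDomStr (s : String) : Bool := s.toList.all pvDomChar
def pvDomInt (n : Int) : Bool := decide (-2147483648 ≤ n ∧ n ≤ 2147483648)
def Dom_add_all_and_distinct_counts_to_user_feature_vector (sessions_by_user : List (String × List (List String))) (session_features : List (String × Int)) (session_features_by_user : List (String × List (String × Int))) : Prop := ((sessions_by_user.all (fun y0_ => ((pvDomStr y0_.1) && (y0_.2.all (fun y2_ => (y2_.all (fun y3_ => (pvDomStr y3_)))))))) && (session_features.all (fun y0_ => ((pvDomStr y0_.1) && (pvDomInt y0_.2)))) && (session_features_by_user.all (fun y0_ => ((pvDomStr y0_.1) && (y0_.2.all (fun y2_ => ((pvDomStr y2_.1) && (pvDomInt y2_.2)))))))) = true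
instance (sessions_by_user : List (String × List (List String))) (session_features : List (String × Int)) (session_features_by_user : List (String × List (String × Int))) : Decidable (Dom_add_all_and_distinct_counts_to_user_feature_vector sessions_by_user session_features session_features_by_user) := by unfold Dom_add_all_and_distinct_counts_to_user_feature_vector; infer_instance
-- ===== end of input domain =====

-- B replaces A's fused per-entry pass (a counter plus four hash-set accumulators) with
-- len(entries) and, per feature, sort-then-scan distinct counting (sort the value list,
-- count positions where the value changes); objective: alternative. A mutates
-- session_features_by_user in place and returns it; B performs the same in-place mutation.

-- ===== PORT A =====
-- session_features_by_user[user][key] = value  (inner dict assignment on an existing user key)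
def pvSetIn (d : PySem.Dict String (List (String × Int))) (u k : String) (v : Int) :
    PySem.Dict String (List (String × Int)) :=
  d.insert u (((PySem.Dict.mk (d.getD u [])).insert k v).items)

def add_all_and_distinct_counts_to_user_feature_vector (sessions_by_user : List (String × List (List String))) (session_features : List (String × Int)) (session_features_by_user : List (String × List (String × Int))) : List (String × List (String × Int)) :=
  let sbuD : PySem.Dict String (List (List String)) := PySem.Dict.mk sessions_by_user
  let sfD : PySem.Dict String Int := PySem.Dict.mk session_features
  ((PySem.Dict.mk session_features_by_user).keys.foldl (fun d user =>
      -- the fused inner loop: count + four distinct sets, one entry pass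
      let st := (sbuD.getD user []).foldl
        (fun (s : Int × PySem.Set String × PySem.Set String × PySem.Set String × PySem.Set String) entry =>
          (s.1 + 1,
           PySem.Set.add s.2.1 (PySem.List.pyGetD entry (sfD.getD "action" 0) ""),
           PySem.Set.add s.2.2.1 (PySem.List.pyGetD entry (sfD.getD "action_type" 0) ""),
           PySem.Set.add s.2.2.2.1 (PySem.List.pyGetD entry (sfD.getD "action_detail" 0) ""),
           PySem.Set.add s.2.2.2.2 (PySem.List.pyGetD entry (sfD.getD "device_type" 0) "")))
        (0, PySem.Set.empty, PySem.Set.empty, PySem.Set.empty, PySem.Set.empty)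
      let d := pvSetIn d user "n_actions_per_user" st.1
      let d := pvSetIn d user "n_distinct_actions" (PySem.Set.len st.2.1)
      let d := pvSetIn d user "n_distinct_action_types" (PySem.Set.len st.2.2.1)
      let d := pvSetIn d user "n_distinct_action_detail" (PySem.Set.len st.2.2.2.1)
      let d := pvSetIn d user "n_distinct_device_types" (PySem.Set.len st.2.2.2.2)
      d)
    (PySem.Dict.mk session_features_by_user)).items

-- ===== PORT B =====
-- _n_distinct_sorted(vals): sort, then count positions where the value changes
def pvNDistinctSorted (vals : List String) : Int :=
  ((PySem.List.sorted vals (fun x => x) false).foldl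
    (fun (s : Int × Option String) v =>
      (if s.2 = none ∨ s.2 ≠ some v then s.1 + 1 else s.1, some v)) (0, none)).1

def add_all_and_distinct_counts_to_user_feature_vector_alt (sessions_by_user : List (String × List (List String))) (session_features : List (String × Int)) (session_features_by_user : List (String × List (String × Int))) : List (String × List (String × Int)) :=
  let sbuD : PySem.Dict String (List (List String)) := PySem.Dict.mk sessions_by_user
  let sfD : PySem.Dict String Int := PySem.Dict.mk session_features
  ((PySem.Dict.mk session_features_by_user).keys.foldl (fun d user =>
      let entries := sbuD.getD user []
      let fv := PySem.Dict.mk (d.getD user [])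
      let fv := fv.insert "n_actions_per_user" (entries.length : Int)
      let fv := fv.insert "n_distinct_actions"
        (pvNDistinctSorted (entries.map (fun e => PySem.List.pyGetD e (sfD.getD "action" 0) "")))
      let fv := fv.insert "n_distinct_action_types"
        (pvNDistinctSorted (entries.map (fun e => PySem.List.pyGetD e (sfD.getD "action_type" 0) "")))
      let fv := fv.insert "n_distinct_action_detail"
        (pvNDistinctSorted (entries.map (fun e => PySem.List.pyGetD e (sfD.getD "action_detail" 0) "")))
      let fv := fv.insert "n_distinct_device_types"
        (pvNDistinctSorted (entries.map (fun e => PySem.List.pyGetD e (sfD.getD "device_type" 0) "")))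
      d.insert user fv.items)
    (PySem.Dict.mk session_features_by_user)).items

-- ===== PRECONDITION & SPEC =====
-- Pre_ excludes exactly the inputs where the Python raises: a user of
-- session_features_by_user absent from sessions_by_user (KeyError), or — whenever some
-- session entry is actually processed — a feature key missing from session_features
-- (KeyError) or its index out of range for that entry (IndexError).
def Pre_add_all_and_distinct_counts_to_user_feature_vector (sessions_by_user : List (String × List (List String))) (session_features : List (String × Int)) (session_features_by_user : List (String × List (String × Int))) : Prop :=
  ∀ p ∈ session_features_by_user,
    (PySem.Dict.mk sessions_by_user).contains p.1 = true ∧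
    ∀ e ∈ (PySem.Dict.mk sessions_by_user).getD p.1 [],
      (["action", "action_type", "action_detail", "device_type"].all
          (fun k => (PySem.Dict.mk session_features).contains k)) = true ∧
      PySem.Raise.InRange e.length ((PySem.Dict.mk session_features).getD "action" 0) ∧
      PySem.Raise.InRange e.length ((PySem.Dict.mk session_features).getD "action_type" 0) ∧
      PySem.Raise.InRange e.length ((PySem.Dict.mk session_features).getD "action_detail" 0) ∧
      PySem.Raise.InRange e.length ((PySem.Dict.mk session_features).getD "device_type" 0)
instance (sessions_by_user : List (String × List (List String))) (session_features : List (String × Int)) (session_features_by_user : List (String × List (String × Int))) : Decidable (Pre_add_all_and_distinct_counts_to_user_feature_vector sessions_by_user session_features session_features_by_user) := by unfold Pre_add_all_and_distinct_counts_to_user_feature_vector; infer_instance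

def pvWitness_add_all_and_distinct_counts_to_user_feature_vector : (List (String × List (List String))) × (List (String × Int)) × (List (String × List (String × Int))) :=
  ([("u", [["a", "x"], ["b", "x"]])],
   [("action", 0), ("action_type", 1), ("action_detail", 0), ("device_type", 1)],
   [("u", [("f", 3)])])

def Spec_add_all_and_distinct_counts_to_user_feature_vector (sessions_by_user : List (String × List (List String))) (session_features : List (String × Int)) (session_features_by_user : List (String × List (String × Int))) (out : List (String × List (String × Int))) : Prop := out = add_all_and_distinct_counts_to_user_feature_vector_alt sessions_by_user session_features session_features_by_user
instance (sessions_by_user : List (String × List (List String))) (session_features : List (String × Int)) (session_features_by_user : List (String × List (String × Int))) (out : List (String × List (String × Int))) : Decidable (Spec_add_all_and_distinct_counts_to_user_feature_vector sessions_by_user session_features session_features_by_user out) := by unfold Spec_add_all_and_distinct_counts_to_user_feature_vector; infer_instance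

-- ===== CLAIM (what is proved, stated in full; the proofs are below) =====
def Claim_equal_add_all_and_distinct_counts_to_user_feature_vector : Prop := ∀ (sessions_by_user : List (String × List (List String))) (session_features : List (String × Int)) (session_features_by_user : List (String × List (String × Int))), Dom_add_all_and_distinct_counts_to_user_feature_vector sessions_by_user session_features session_features_by_user → Pre_add_all_and_distinct_counts_to_user_feature_vector sessions_by_user session_features session_features_by_user → Spec_add_all_and_distinct_counts_to_user_feature_vector sessions_by_user session_features session_features_by_user (add_all_and_distinct_counts_to_user_feature_vector sessions_by_user session_features session_features_by_user)

-- ===== LEMMAS AND PROOFS =====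

-- A's fused five-accumulator fold splits into a length and four independent set folds.
theorem pvFold5 (g1 g2 g3 g4 : List String → String) :
    ∀ (l : List (List String)) (n : Int) (a b c d : PySem.Set String),
    l.foldl (fun s e =>
        (s.1 + 1, PySem.Set.add s.2.1 (g1 e), PySem.Set.add s.2.2.1 (g2 e),
         PySem.Set.add s.2.2.2.1 (g3 e), PySem.Set.add s.2.2.2.2 (g4 e))) (n, a, b, c, d)
      = (n + l.length, (l.map g1).foldl PySem.Set.add a, (l.map g2).foldl PySem.Set.add b,
         (l.map g3).foldl PySem.Set.add c, (l.map g4).foldl PySem.Set.add d)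
  | [], n, a, b, c, d => by simp
  | e :: l, n, a, b, c, d => by
      simp only [List.foldl_cons, List.map_cons, pvFold5 g1 g2 g3 g4 l, List.length_cons]
      refine Prod.ext ?_ rfl
      push_cast
      ring

-- invariant of B's scan: after the first element, counting value changes over a sorted
-- tail with all elements ≥ the previous value counts exactly the distinct values ≠ prev
theorem pvCountAux :
    ∀ (t : List String) (c : Int) (p : String),
    t.Pairwise (fun a b => a ≤ b) → (∀ x ∈ t, p ≤ x) →
    (t.foldl (fun (s : Int × Option String) v =>
        (if s.2 = none ∨ s.2 ≠ some v then s.1 + 1 else s.1, some v)) (c, some p)).1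
      = c + (((PySem.Set.ofList t).filter (fun y => !(y == p))).length : Int)
  | [], c, p, _, _ => by simp
  | v :: t, c, p, hp, hle => by
    rcases List.pairwise_cons.mp hp with ⟨hv, ht⟩
    by_cases hvp : v = p
    · subst hvp
      simp only [List.foldl_cons]
      rw [if_neg (by simp)]
      rw [pvCountAux t c v ht (fun x hx => le_trans (hle v (by simp)) (hv x hx))]
      congr 2
      rw [PySem.Set.ofList_cons]
      simp [PySem.Set.discard, List.filter_filter]
    · have hpt : p ∉ t := fun hmem =>
        hvp (le_antisymm (hv p hmem) (hle v (by simp)))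
      simp only [List.foldl_cons]
      rw [if_pos (Or.inr (by simp; exact fun h => hvp h.symm))]
      rw [pvCountAux t (c + 1) v ht (fun x hx => hv x hx)]
      rw [PySem.Set.ofList_cons]
      have hfc : ((PySem.Set.discard (PySem.Set.ofList t) v).filter (fun y => !(y == p)))
          = PySem.Set.discard (PySem.Set.ofList t) v := by
        apply List.filter_eq_self.mpr
        intro y hy
        have hyt : y ∈ PySem.Set.ofList t := List.mem_of_mem_filter hy
        have hyt' : y ∈ t := (PySem.Set.mem_ofList _ _).mp hyt
        have hyp : y ≠ p := fun h => hpt (h ▸ hyt')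
        simp [hyp]
      simp only [List.filter_cons, PySem.Set.discard] at *
      rw [show (!(v == p)) = true by simp [hvp]]
      simp only [if_pos trivial, List.length_cons, hfc]
      push_cast
      ring
  termination_by t => t.length

-- B's scan over a sorted list counts its distinct elements
theorem pvCountSorted (l : List String) (h : l.Pairwise (fun a b => a ≤ b)) :
    (l.foldl (fun (s : Int × Option String) v =>
        (if s.2 = none ∨ s.2 ≠ some v then s.1 + 1 else s.1, some v)) (0, none)).1
      = ((PySem.Set.ofList l).length : Int) := by
  cases l with
  | nil => simp
  | cons v t =>
    rcases List.pairwise_cons.mp h with ⟨hv, ht⟩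
    simp only [List.foldl_cons]
    rw [if_pos (by simp)]
    rw [pvCountAux t (0 + 1) v ht hv]
    rw [PySem.Set.ofList_cons]
    simp [PySem.Set.discard]
    ring

-- sort-then-scan distinct counting = the size of the set of the values
theorem pvNDistinct_eq (vals : List String) :
    pvNDistinctSorted vals = PySem.Set.len (PySem.Set.ofList vals) := by
  unfold pvNDistinctSorted
  rw [pvCountSorted _ (PySem.List.sorted_pairwise vals (fun x => x) )]
  have hperm : (PySem.Set.ofList (PySem.List.sorted vals (fun x => x) false)).Perm
      (PySem.Set.ofList vals) := by
    rw [List.perm_ext_iff_of_nodup (PySem.Set.nodup_ofList _) (PySem.Set.nodup_ofList _)]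
    intro x
    simp [PySem.Set.mem_ofList, PySem.List.mem_sorted]
  simp [PySem.Set.len, hperm.length_eq]

theorem add_all_and_distinct_counts_to_user_feature_vector_spec : Claim_equal_add_all_and_distinct_counts_to_user_feature_vector := by
  intro sbu sf sfbu _ _
  unfold Spec_add_all_and_distinct_counts_to_user_feature_vector
  unfold add_all_and_distinct_counts_to_user_feature_vector
         add_all_and_distinct_counts_to_user_feature_vector_alt
  simp only []
  congr 2
  funext d user
  simp only [pvFold5, pvSetIn, pvNDistinct_eq, PySem.Set.ofList_eq_foldl, PySem.Set.empty,
    PySem.Dict.getD_insert_self, PySem.Dict.insert_insert_self]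
  norm_num

-- ===== VERDICT (by name: the statement is the Claim_ definition above) =====
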